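-- pv_equiv track=rewrite | github.com/nilsgaebel/AlgorithmPlayground | QuaternaryNumeralSystem.py | decimal_to_quaternary_number
-- ===== SOURCE A (Python) =====
-- def decimal_to_quaternary_number(dec_num):
--     """
--     This function converts a decimal number into a quaternary number (base 4) with Binary operations.
--     The algorithm evaluates the Bit Pattern of a decimal number. The bits are grouped into pairs.
--     Each bit pair represents a quaternary number: 00 -> 0, 01 -> 1, 10 -> 2, 11 -> 3
--     Bitshifting is used to evaluate each bit pair starting at the end
--
--     : param dec_num: decimal number
--     : type dec_num: int
--     : return: quaternary number
--     : rtype: int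
--     """
--
--     if dec_num < 0:
--         raise ValueError("Input must be a non negative number.")
--
--     if dec_num == 0:
--         return 0
--
--     result = ""
--     while dec_num > 0:
--         lastBits = dec_num & 0b11
--         result = str(lastBits) + result
--         dec_num = dec_num >> 2
--
--     return int(result)
-- ===== SOURCE B (Python) =====
-- def _quat_str(n):
--     if n == 0:
--         return ""
--     return _quat_str(n // 4) + str(n % 4)
--
--
-- def decimal_to_quaternary_number(dec_num):
--     if dec_num < 0:
--         raise ValueError("Input must be a non negative number.")
--     if dec_num == 0:
--         return 0
--     return int(_quat_str(dec_num))
-- ===== Notes on version B (the rewrite author's own statement) =====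
-- stated objective: simpler
-- what changed: Replaces the while-loop that mutates dec_num with bit masking/shifting and prepends each digit into a string buffer by a short recursive helper that builds the base-four digit string front-first via floor division and remainder by four, appending the last digit.
import Mathlib
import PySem

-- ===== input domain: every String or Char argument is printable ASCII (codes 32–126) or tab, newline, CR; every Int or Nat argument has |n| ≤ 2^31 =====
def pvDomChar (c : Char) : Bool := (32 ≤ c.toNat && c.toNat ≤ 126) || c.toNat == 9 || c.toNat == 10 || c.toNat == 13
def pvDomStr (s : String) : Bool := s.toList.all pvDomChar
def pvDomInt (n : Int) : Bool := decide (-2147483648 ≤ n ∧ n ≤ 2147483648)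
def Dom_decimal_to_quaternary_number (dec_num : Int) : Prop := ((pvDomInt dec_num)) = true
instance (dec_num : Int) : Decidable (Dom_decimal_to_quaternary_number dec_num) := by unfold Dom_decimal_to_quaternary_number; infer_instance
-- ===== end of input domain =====

-- ===== PORT A =====
-- B builds the same base-4 digit string with a recursive helper (n // 4, n % 4, append)
-- instead of A's while-loop with bit operations and string prepending; return values only.

-- termination helper for the ports (cited in decreasing_by)
theorem pvShift2_toNat_lt (n : Int) (h : 0 < n) : (n >>> (2 : Nat)).toNat < n.toNat := by
  obtain ⟨m, rfl⟩ := Int.eq_ofNat_of_zero_le h.le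
  have : (m : Int) >>> (2 : Nat) = ((m >>> 2 : Nat) : Int) := by
    simp [Int.shiftRight_eq_div_pow, Nat.shiftRight_eq_div_pow]
  rw [this]
  simp only [Int.toNat_natCast]
  have hm : 0 < m := by exact_mod_cast h
  omega

theorem pvFloordiv4_toNat_lt (n : Int) (h : 0 < n) : (PySem.Int.floordiv n 4).toNat < n.toNat := by
  rw [PySem.Int.floordiv_eq_ediv_of_pos (by norm_num)]
  omega

-- result = ""; while dec_num > 0: lastBits = dec_num & 0b11; result = str(lastBits) + result; dec_num = dec_num >> 2
def pvALoop (n : Int) (result : List Char) : List Char :=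
  if _h : 0 < n then
    pvALoop (n >>> (2 : Nat)) (PySem.Int.toChars (PySem.Int.band n 3) ++ result)
  else result
termination_by n.toNat
decreasing_by exact pvShift2_toNat_lt n _h

def decimal_to_quaternary_number (dec_num : Int) : Int :=
  if dec_num < 0 then 0        -- Python raises ValueError here; excluded by Pre_
  else if dec_num = 0 then 0
  else (PySem.Int.ofChars? (pvALoop dec_num [])).getD 0   -- int(result); never none on this digit string

-- ===== PORT B =====
-- def _quat_str(n): return "" if n == 0 else _quat_str(n // 4) + str(n % 4)
-- (guard written as 0 < n instead of n != 0 only to make the recursion total; the helper is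
--  only ever called with n >= 0)
def pvQuatStr (n : Int) : List Char :=
  if _h : 0 < n then
    pvQuatStr (PySem.Int.floordiv n 4) ++ PySem.Int.toChars (PySem.Int.mod n 4)
  else []
termination_by n.toNat
decreasing_by exact pvFloordiv4_toNat_lt n _h

def decimal_to_quaternary_number_alt (dec_num : Int) : Int :=
  if dec_num < 0 then 0        -- raise ValueError; excluded by Pre_
  else if dec_num = 0 then 0
  else (PySem.Int.ofChars? (pvQuatStr dec_num)).getD 0    -- int(_quat_str(dec_num))

-- ===== PRECONDITION & SPEC =====
-- Pre_ excludes exactly the negative inputs, on which the Python A raises ValueError.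
def Pre_decimal_to_quaternary_number (dec_num : Int) : Prop := 0 ≤ dec_num
instance (dec_num : Int) : Decidable (Pre_decimal_to_quaternary_number dec_num) := by
  unfold Pre_decimal_to_quaternary_number; infer_instance
def pvWitness_decimal_to_quaternary_number : Int := 7

def Spec_decimal_to_quaternary_number (dec_num : Int) (out : Int) : Prop := out = decimal_to_quaternary_number_alt dec_num
instance (dec_num : Int) (out : Int) : Decidable (Spec_decimal_to_quaternary_number dec_num out) := by unfold Spec_decimal_to_quaternary_number; infer_instance

-- ===== CLAIM (what is proved, stated in full; the proofs are below) =====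
def Claim_equal_decimal_to_quaternary_number : Prop := ∀ (dec_num : Int), Dom_decimal_to_quaternary_number dec_num → Pre_decimal_to_quaternary_number dec_num → Spec_decimal_to_quaternary_number dec_num (decimal_to_quaternary_number dec_num)

-- ===== LEMMAS AND PROOFS =====

theorem pvShift2_eq_floordiv (n : Int) (h : 0 ≤ n) :
    n >>> (2 : Nat) = PySem.Int.floordiv n 4 := by
  obtain ⟨m, rfl⟩ := Int.eq_ofNat_of_zero_le h
  rw [PySem.Int.floordiv_eq_ediv_of_pos (by norm_num)]
  simp [Int.shiftRight_eq_div_pow]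

theorem pvBand3_eq_mod (n : Int) (h : 0 ≤ n) :
    PySem.Int.band n 3 = PySem.Int.mod n 4 := by
  obtain ⟨m, rfl⟩ := Int.eq_ofNat_of_zero_le h
  rw [PySem.Int.mod_eq_emod_of_pos (by norm_num)]
  rw [PySem.Int.band_of_nonneg (by positivity) (by norm_num)]
  have h3 : ((3 : Int)).toNat = 3 := by decide
  have hand : m &&& 3 = m % 4 := by
    have := Nat.and_two_pow_sub_one_eq_mod m 2
    norm_num at this
    exact this
  simp [h3, hand]

theorem pvALoop_eq_quatStr (n : Int) (res : List Char) :
    pvALoop n res = pvQuatStr n ++ res := by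
  induction n, res using pvALoop.induct with
  | case1 n res h ih =>
      rw [pvALoop]
      simp only [h, dite_true]
      rw [ih]
      conv_rhs => rw [pvQuatStr]
      simp only [h, dite_true]
      rw [pvShift2_eq_floordiv n h.le, pvBand3_eq_mod n h.le, List.append_assoc]
  | case2 n res h =>
      rw [pvALoop, pvQuatStr]
      simp [h]

-- ===== VERDICT (by name: the statement is the Claim_ definition above) =====
theorem decimal_to_quaternary_number_spec : Claim_equal_decimal_to_quaternary_number := by
  intro dec_num _ hpre
  unfold Spec_decimal_to_quaternary_number decimal_to_quaternary_number decimal_to_quaternary_number_alt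
  have hneg : ¬ dec_num < 0 := not_lt.mpr hpre
  by_cases h0 : dec_num = 0
  · simp [h0]
  · simp only [hneg, if_false, h0]
    rw [pvALoop_eq_quatStr, List.append_nil]
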